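-- pv_equiv track=rewrite | github.com/LuckJMG/Tareas-Progra | Tareas/tarea6.py | puntaje_palabra
-- ===== SOURCE A (Python) =====
-- def puntaje_palabra(palabra):
--     # Variables
--     vocales = "aeiou"
--     vocales_contador = 0
--     consonantes_contador = 0
--
--     # Determinar cantidad de vocales y consonantes
--     for letra in palabra:
--         if letra in vocales:
--             vocales_contador += 1
--         else:
--             consonantes_contador += 1
--
--     # Calcular puntaje
--     puntaje = 10 * len(palabra) + 5 * vocales_contador + 3 * consonantes_contador
--
--     return puntaje
-- ===== SOURCE B (Python) =====
-- def puntaje_palabra(palabra):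
--     # Divide and conquer: the score is additive over any split of the word,
--     # a single character scores its fused weight (vowel 10+5=15, other 10+3=13).
--     if len(palabra) == 0:
--         return 0
--     if len(palabra) == 1:
--         return 15 if palabra[0] in "aeiou" else 13
--     mitad = len(palabra) // 2
--     return puntaje_palabra(palabra[:mitad]) + puntaje_palabra(palabra[mitad:])
-- ===== Notes on version B (the rewrite author's own statement) =====
-- stated objective: alternative
-- what changed: Replaces the iterative double-counter loop plus final weighted sum by a divide-and-conquer recursion with no counters and no global length: a single character scores its fused weight (15 for a vowel, 13 otherwise) and a longer word is the sum of the scores of its two halves.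
import Mathlib
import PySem

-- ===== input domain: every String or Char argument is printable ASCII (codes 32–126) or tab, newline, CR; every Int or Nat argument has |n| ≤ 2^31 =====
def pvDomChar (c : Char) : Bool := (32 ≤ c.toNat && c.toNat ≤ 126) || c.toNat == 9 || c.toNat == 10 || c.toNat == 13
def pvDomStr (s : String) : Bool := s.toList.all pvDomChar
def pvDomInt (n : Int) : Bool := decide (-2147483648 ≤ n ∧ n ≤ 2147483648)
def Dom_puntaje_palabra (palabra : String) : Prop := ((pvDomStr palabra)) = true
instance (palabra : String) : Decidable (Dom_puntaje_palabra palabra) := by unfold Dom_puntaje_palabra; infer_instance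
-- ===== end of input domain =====

-- B replaces the two-counter loop + weighted sum by a counterless structural recursion
-- scoring each character with its fused weight (objective: alternative).

-- ===== PORT A =====
-- literal port of A: one pass maintaining a vowel and a consonant counter, then the weighted sum
def puntaje_palabra (palabra : String) : Int :=
  let counts := palabra.toList.foldl
    (fun (acc : Int × Int) letra =>
      if letra ∈ "aeiou".toList then (acc.1 + 1, acc.2) else (acc.1, acc.2 + 1))
    (0, 0)
  10 * (palabra.toList.length : Int) + 5 * counts.1 + 3 * counts.2

-- ===== PORT B =====
-- port of B: divide-and-conquer on the characters; len 0 -> 0, len 1 -> fused weight,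
-- else the sum of the scores of the two halves (take/drop at len // 2 = palabra[:mitad] / palabra[mitad:];
-- the Nat division l.length / 2 is exact for Python's // on these nonnegative operands).
-- The fuel argument is only a structural-termination guard: it starts at the length and
-- strictly dominates every recursive call, so the 0-fuel branch is never reached.
def puntaje_palabra_alt_aux : Nat → List Char → Int
  | 0, _ => 0
  | fuel + 1, l =>
    if l.length = 0 then 0
    else if l.length = 1 then (if l.headI ∈ "aeiou".toList then 15 else 13)
    else
      puntaje_palabra_alt_aux fuel (l.take (l.length / 2))
        + puntaje_palabra_alt_aux fuel (l.drop (l.length / 2))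

def puntaje_palabra_alt (palabra : String) : Int :=
  puntaje_palabra_alt_aux palabra.toList.length palabra.toList

-- ===== PRECONDITION & SPEC =====
def Spec_puntaje_palabra (palabra : String) (out : Int) : Prop := out = puntaje_palabra_alt palabra
instance (palabra : String) (out : Int) : Decidable (Spec_puntaje_palabra palabra out) := by unfold Spec_puntaje_palabra; infer_instance

-- ===== CLAIM =====
def Claim_equal_puntaje_palabra : Prop := ∀ (palabra : String), Dom_puntaje_palabra palabra → Spec_puntaje_palabra palabra (puntaje_palabra palabra)

-- ===== LEMMAS AND PROOFS =====
-- A's fold: the two counters count the vowels and the non-vowels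
theorem pv_fold_counts (l : List Char) (v c : Int) :
    l.foldl (fun (acc : Int × Int) letra =>
      if letra ∈ "aeiou".toList then (acc.1 + 1, acc.2) else (acc.1, acc.2 + 1)) (v, c)
    = (v + (l.countP (fun x => decide (x ∈ "aeiou".toList)) : Nat),
       c + (l.countP (fun x => !decide (x ∈ "aeiou".toList)) : Nat)) := by
  induction l generalizing v c with
  | nil => simp
  | cons h t ih =>
      by_cases hp : h ∈ "aeiou".toList
      · rw [List.foldl_cons, if_pos hp, ih]
        simp only [List.countP_cons, hp, decide_true, Bool.not_true, Prod.mk.injEq]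
        constructor <;> push_cast <;> ring
      · rw [List.foldl_cons, if_neg hp, ih]
        simp only [List.countP_cons, hp, decide_false, Bool.not_false, Prod.mk.injEq]
        constructor <;> push_cast <;> ring

-- B's divide-and-conquer equals the fused closed form (for sufficient fuel)
theorem pv_aux_closed (fuel : Nat) (l : List Char) (hf : l.length ≤ fuel) :
    puntaje_palabra_alt_aux fuel l
      = 13 * (l.length : Int) + 2 * (l.countP (fun x => decide (x ∈ "aeiou".toList)) : Nat) := by
  induction fuel generalizing l with
  | zero =>
      have : l = [] := List.eq_nil_of_length_eq_zero (Nat.le_zero.mp hf)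
      subst this; simp [puntaje_palabra_alt_aux]
  | succ fuel ih =>
      rw [puntaje_palabra_alt_aux]
      by_cases h0 : l.length = 0
      · have : l = [] := List.eq_nil_of_length_eq_zero h0
        subst this; simp
      · by_cases h1 : l.length = 1
        · rw [if_neg h0, if_pos h1]
          match l, h1 with
          | [c], _ =>
              by_cases hp : c ∈ "aeiou".toList
              · simp_all
              · simp_all
        · rw [if_neg h0, if_neg h1]
          have hlen : (l.take (l.length / 2)).length + (l.drop (l.length / 2)).length
              = l.length := by
            rw [← List.length_append, List.take_append_drop]
          have hcnt : (l.take (l.length / 2)).countP (fun x => decide (x ∈ "aeiou".toList))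
                + (l.drop (l.length / 2)).countP (fun x => decide (x ∈ "aeiou".toList))
              = l.countP (fun x => decide (x ∈ "aeiou".toList)) := by
            rw [← List.countP_append, List.take_append_drop]
          have ht : (l.take (l.length / 2)).length ≤ fuel := by
            simp only [List.length_take]; omega
          have hd : (l.drop (l.length / 2)).length ≤ fuel := by
            simp only [List.length_drop]; omega
          rw [ih _ ht, ih _ hd]
          omega

-- ===== VERDICT =====
theorem puntaje_palabra_spec : Claim_equal_puntaje_palabra := by
  intro palabra _
  unfold Spec_puntaje_palabra puntaje_palabra puntaje_palabra_alt
  rw [pv_fold_counts, pv_aux_closed _ _ (le_refl _)]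
  have hsum := List.length_eq_countP_add_countP
    (l := palabra.toList) (fun x => decide (x ∈ "aeiou".toList))
  simp only [decide_not, Bool.decide_eq_true] at hsum
  simp only [zero_add]
  omega
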